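-- pv_equiv track=rewrite | github.com/Alusus/Alusus | Tools/build_src/parse_path_envvar.py | _tokenize_path_envvar_unix
-- ===== SOURCE A (Python) =====
-- def _tokenize_path_envvar_unix(path_envvar):
--     tokens = list()
--     i = 0
--     while i < len(path_envvar):
--         curr_char = path_envvar[i] if i < len(path_envvar) else None
--         if curr_char == ":":
--             tokens.append(curr_char)
--             i += 1
--         else:
--             curr_token = ""
--             while curr_char != ":" and i < len(path_envvar):
--                 curr_token += curr_char
--                 i += 1
--                 curr_char = path_envvar[i] if i < len(path_envvar) else None
--             tokens.append(curr_token)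
--     return tokens
-- ===== SOURCE B (Python) =====
-- def _tokenize_path_envvar_unix(path_envvar):
--     parts = path_envvar.split(':')
--     tokens = [p for p in parts[:1] if p]
--     for part in parts[1:]:
--         tokens.append(':')
--         if part:
--             tokens.append(part)
--     return tokens
-- ===== Notes on version B (the rewrite author's own statement) =====
-- stated objective: faster
-- what changed: Replaces the index-driven nested while-loop state machine that grows each token by repeated char-by-char string concatenation with str.split on the separator followed by one pass that re-interleaves separator tokens and keeps non-empty pieces.
import Mathlib
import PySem

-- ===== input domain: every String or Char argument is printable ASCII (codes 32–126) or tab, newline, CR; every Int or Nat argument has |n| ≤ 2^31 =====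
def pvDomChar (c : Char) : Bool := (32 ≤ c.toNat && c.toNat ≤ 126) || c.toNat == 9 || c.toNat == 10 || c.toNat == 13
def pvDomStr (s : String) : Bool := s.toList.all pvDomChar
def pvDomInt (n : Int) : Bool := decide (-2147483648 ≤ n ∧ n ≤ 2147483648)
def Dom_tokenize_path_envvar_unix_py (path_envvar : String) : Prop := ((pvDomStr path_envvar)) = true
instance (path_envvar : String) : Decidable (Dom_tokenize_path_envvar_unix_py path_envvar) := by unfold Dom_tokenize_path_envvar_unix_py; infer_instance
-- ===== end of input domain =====

-- B replaces A's index-driven nested-while state machine (char-by-char string concatenation) with str.split plus one re-interleaving pass; measured faster in a timing run.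

-- ===== PORT A =====
-- Port of A: index-driven state machine; the inner `while` that builds curr_token char by char
-- is `pvInnerA` (the growing token is kept as its List Char; appended as a String, exact).
def pvInnerA (curr_token : List Char) (cs : List Char) : List Char × List Char :=
  match cs with
  | [] => (curr_token, [])
  | c :: rest => if c = ':' then (curr_token, c :: rest) else pvInnerA (curr_token ++ [c]) rest

-- needed by pvOuterA's decreasing_by: the inner loop returns a suffix of its input
theorem pvInnerA_spec (curr_token cs : List Char) :
    pvInnerA curr_token cs =
      (curr_token ++ cs.takeWhile (fun x => x != ':'), cs.dropWhile (fun x => x != ':')) := by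
  induction cs generalizing curr_token with
  | nil => simp [pvInnerA]
  | cons c rest ih =>
    by_cases h : c = ':' <;> simp [pvInnerA, h, ih]

def pvOuterA : List Char → List String
  | [] => []
  | c :: rest =>
    if h : c = ':' then ":" :: pvOuterA rest
    else
      let p := pvInnerA [] (c :: rest)
      String.ofList p.1 :: pvOuterA p.2
termination_by cs => cs.length
decreasing_by
  · simp only [List.length_cons]; omega
  · rw [pvInnerA_spec]
    have hle := List.length_dropWhile_le (fun x => x != ':') rest
    simp [List.dropWhile_cons, h]
    omega

def tokenize_path_envvar_unix_py (path_envvar : String) : List String :=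
  pvOuterA path_envvar.toList

-- ===== PORT B =====
-- Port of B: parts = path_envvar.split(':'); keep the (non-empty) first part, then for each
-- later part append ':' and, if non-empty, the part.
def tokenize_path_envvar_unix_py_alt (path_envvar : String) : List String :=
  let parts := (PySem.Str.split? path_envvar ":").getD []
  let tokens := (PySem.List.slice parts none (some 1)).filter (fun p => p != "")
  (PySem.List.slice parts (some 1) none).foldl
    (fun acc part => (acc ++ [":"]) ++ (if part != "" then [part] else [])) tokens

-- ===== PRECONDITION & SPEC =====
def Spec_tokenize_path_envvar_unix_py (path_envvar : String) (out : List String) : Prop := out = tokenize_path_envvar_unix_py_alt path_envvar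
instance (path_envvar : String) (out : List String) : Decidable (Spec_tokenize_path_envvar_unix_py path_envvar out) := by unfold Spec_tokenize_path_envvar_unix_py; infer_instance

-- ===== CLAIM (what is proved, stated in full; the proofs are below) =====
def Claim_equal_tokenize_path_envvar_unix_py : Prop := ∀ (path_envvar : String), Dom_tokenize_path_envvar_unix_py path_envvar → Spec_tokenize_path_envvar_unix_py path_envvar (tokenize_path_envvar_unix_py path_envvar)

-- ===== LEMMAS AND PROOFS =====

-- canonical single-colon splitter (proof-only)
def mySplit : List Char → List (List Char)
  | [] => [[]]
  | c :: rest => if c = ':' then [] :: mySplit rest else (mySplit rest).modifyHead (c :: ·)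

theorem mySplit_ne_nil (cs : List Char) : mySplit cs ≠ [] := by
  cases cs with
  | nil => simp [mySplit]
  | cons c rest =>
    by_cases h : c = ':' <;> simp [mySplit, h]
    cases hr : mySplit rest with
    | nil => exact absurd hr (mySplit_ne_nil rest)
    | cons a t => simp

theorem modifyHead_id' (l : List (List Char)) : l.modifyHead (fun x => x) = l := by
  cases l <;> simp

theorem go_nil (sep : List Char) (f : Nat) (cur : List Char) (acc : List (List Char)) :
    PySem.Chars.splitOn.go sep (f + 1) [] cur acc = (cur.reverse :: acc).reverse := rfl

theorem go_cons (sep : List Char) (f : Nat) (c : Char) (rest cur : List Char)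
    (acc : List (List Char)) :
    PySem.Chars.splitOn.go sep (f + 1) (c :: rest) cur acc =
      if sep.isPrefixOf (c :: rest) = true then
        PySem.Chars.splitOn.go sep f (List.drop sep.length (c :: rest)) [] (cur.reverse :: acc)
      else PySem.Chars.splitOn.go sep f rest (c :: cur) acc := rfl

theorem splitOn_go_singleton (fuel : Nat) :
    ∀ (l cur : List Char) (acc : List (List Char)), l.length < fuel →
      PySem.Chars.splitOn.go [':'] fuel l cur acc =
        acc.reverse ++ (mySplit l).modifyHead (cur.reverse ++ ·) := by
  induction fuel with
  | zero => intro l cur acc h; omega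
  | succ f ih =>
    intro l cur acc h
    cases l with
    | nil =>
      rw [go_nil]
      simp [mySplit]
    | cons c rest =>
      rw [go_cons]
      by_cases hc : c = ':'
      · subst hc
        have hp : List.isPrefixOf [':'] (':' :: rest) = true := by simp [List.isPrefixOf]
        rw [if_pos hp]
        simp only [List.length_cons, List.length_nil, Nat.zero_add, List.drop_succ_cons, List.drop_zero]
        rw [ih rest [] (cur.reverse :: acc) (by simpa using Nat.lt_of_succ_lt_succ h)]
        simp [mySplit, modifyHead_id']
      · have hp : List.isPrefixOf [':'] (c :: rest) = false := by
          simp [List.isPrefixOf]; exact fun hh => absurd hh.symm hc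
        rw [if_neg (by simp [hp])]
        rw [ih rest (c :: cur) acc (by simpa using Nat.lt_of_succ_lt_succ h)]
        simp only [mySplit, if_neg hc]
        cases hr : mySplit rest with
        | nil => exact absurd hr (mySplit_ne_nil rest)
        | cons a t => simp

theorem splitOn_singleton (cs : List Char) :
    PySem.Chars.splitOn cs [':'] = mySplit cs := by
  unfold PySem.Chars.splitOn
  rw [splitOn_go_singleton (cs.length + 1) cs [] [] (by omega)]
  simp [modifyHead_id']

-- the re-interleaving B performs, stated over char lists
def interTail (ps : List (List Char)) : List String :=
  ps.flatMap (fun q => ":" :: (if q = [] then [] else [String.ofList q]))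

def inter : List (List Char) → List String
  | [] => []
  | p :: rest => (if p = [] then [] else [String.ofList p]) ++ interTail rest

theorem ofList_ne_empty_iff (l : List Char) : (String.ofList l != "") = !l.isEmpty := by
  cases l with
  | nil => decide
  | cons c t =>
    simp only [List.isEmpty_cons, Bool.not_false, bne_iff_ne, ne_eq]
    intro hcontra
    have := congrArg String.toList hcontra
    simp at this

theorem foldlB (ps : List (List Char)) (acc : List String) :
    (ps.map String.ofList).foldl
      (fun a q => (a ++ [":"]) ++ (if q != "" then [q] else [])) acc
    = acc ++ interTail ps := by
  induction ps generalizing acc with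
  | nil => simp [interTail]
  | cons p rest ih =>
    simp only [List.map_cons, List.foldl_cons, ih, interTail, List.flatMap_cons]
    rw [ofList_ne_empty_iff]
    by_cases h : p = [] <;> simp [h, interTail]

theorem B_eq_inter (s : String) :
    tokenize_path_envvar_unix_py_alt s = inter (mySplit s.toList) := by
  unfold tokenize_path_envvar_unix_py_alt
  have hsplit : PySem.Str.split? s ":" = some ((mySplit s.toList).map String.ofList) := by
    show Option.map _ (PySem.Chars.split? s.toList ":".toList) = _
    simp [PySem.Chars.split?, splitOn_singleton]
  rw [hsplit]
  simp only [Option.getD_some]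
  rw [PySem.List.slice_to _ (by norm_num), PySem.List.slice_from _ (by norm_num)]
  cases hm : mySplit s.toList with
  | nil => exact absurd hm (mySplit_ne_nil _)
  | cons p rest =>
    have h1 : ((1 : Int)).toNat = 1 := rfl
    rw [h1]
    simp only [List.map_cons, List.take_succ_cons, List.take_zero, List.drop_succ_cons,
      List.drop_zero]
    rw [foldlB]
    simp only [inter, List.filter_cons, List.filter_nil, ofList_ne_empty_iff]
    by_cases h : p = [] <;> simp [h]

theorem interTail_eq (p : List Char) (t : List (List Char)) :
    interTail (p :: t) = ":" :: inter (p :: t) := by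
  simp [interTail, inter, List.flatMap_cons]

theorem mySplit_run (cs : List Char) :
    mySplit cs = (mySplit (cs.dropWhile (fun x => x != ':'))).modifyHead
      (cs.takeWhile (fun x => x != ':') ++ ·) := by
  induction cs with
  | nil => simp [mySplit]
  | cons c rest ih =>
    by_cases h : c = ':'
    · subst h
      simp [List.takeWhile_cons, List.dropWhile_cons, modifyHead_id']
    · have hT : (c :: rest).takeWhile (fun x => x != ':') =
          c :: rest.takeWhile (fun x => x != ':') := by simp [List.takeWhile_cons, h]
      have hD : (c :: rest).dropWhile (fun x => x != ':') =
          rest.dropWhile (fun x => x != ':') := by simp [List.dropWhile_cons, h]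
      rw [hT, hD, show mySplit (c :: rest) = (mySplit rest).modifyHead (c :: ·) from by
        simp [mySplit, h], ih]
      cases hr : mySplit (rest.dropWhile (fun x => x != ':')) with
      | nil => exact absurd hr (mySplit_ne_nil _)
      | cons a t => simp [List.modifyHead]

theorem mySplit_dropWhile_head (cs : List Char) :
    ∃ t, mySplit (cs.dropWhile (fun x => x != ':')) = [] :: t := by
  induction cs with
  | nil => exact ⟨[], by simp [mySplit]⟩
  | cons c rest ih =>
    by_cases h : c = ':'
    · exact ⟨mySplit rest, by simp [List.dropWhile_cons, h, mySplit]⟩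
    · simpa [List.dropWhile_cons, h] using ih

theorem outerA_eq_inter (cs : List Char) : pvOuterA cs = inter (mySplit cs) := by
  cases hcs : cs with
  | nil => simp [pvOuterA, mySplit, inter, interTail]
  | cons c rest =>
    by_cases h : c = ':'
    · subst h
      have ih := outerA_eq_inter rest
      rw [show pvOuterA (':' :: rest) = ":" :: pvOuterA rest from by simp [pvOuterA]]
      rw [show mySplit (':' :: rest) = [] :: mySplit rest from by simp [mySplit]]
      cases hr : mySplit rest with
      | nil => exact absurd hr (mySplit_ne_nil rest)
      | cons a t =>
        rw [show inter ([] :: a :: t) = interTail (a :: t) from by simp [inter]]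
        rw [interTail_eq, ih, hr]
    · have ih := outerA_eq_inter ((c :: rest).dropWhile (fun x => x != ':'))
      have hL : pvOuterA (c :: rest) =
          String.ofList ((c :: rest).takeWhile (fun x => x != ':')) ::
            pvOuterA ((c :: rest).dropWhile (fun x => x != ':')) := by
        simp only [pvOuterA]
        rw [dif_neg h, pvInnerA_spec]
        simp
      rw [hL, ih]
      conv_rhs => rw [mySplit_run (c :: rest)]
      obtain ⟨t, ht⟩ := mySplit_dropWhile_head (c :: rest)
      rw [ht]
      have hT : (c :: rest).takeWhile (fun x => x != ':') =
          c :: rest.takeWhile (fun x => x != ':') := by simp [List.takeWhile_cons, h]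
      rw [hT]
      simp [inter, List.modifyHead]
  termination_by cs.length
  decreasing_by
    · simp only [List.length_cons]; omega
    · have hle := List.length_dropWhile_le (fun x => x != ':') rest
      simp [List.dropWhile_cons, h]
      omega

-- ===== VERDICT (by name: the statement is the Claim_ definition above) =====
theorem tokenize_path_envvar_unix_py_spec : Claim_equal_tokenize_path_envvar_unix_py := by
  intro s _
  show pvOuterA s.toList = tokenize_path_envvar_unix_py_alt s
  rw [B_eq_inter, outerA_eq_inter]
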